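-- pv_equiv track=rewrite | github.com/tommy780/DNA_designer | random_DNA_sequence_generator.py | overlapping_limit
-- ===== SOURCE A (Python) =====
-- def hamming_distance(str1, str2):
--     if len(str1) != len(str2):
--         raise ValueError("Undefined for sequences of unequal length")
--     return sum(a != b for a, b in zip(str1, str2))
--
-- def overlapping_limit(seq, sub_seq, lapping_num):
--     if lapping_num > len(seq) | lapping_num > len(sub_seq):
--         raise ValueError("Undefined for sequences of overflow lapping_num")
--     else:
--         # choose subunit from sub_seq
--         for i in range(0, len(sub_seq) - lapping_num + 1):
--             temp_sub_seq = ''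
--             for j in range(0, lapping_num):
--                 temp_sub_seq += sub_seq[i + j]
--             # choose subunit from seq
--             for k in range(0, len(seq) - lapping_num + 1):
--                 temp_seq = ''
--                 for j in range(0, lapping_num):
--                     temp_seq += seq[k + j]
--                 hamming_d = hamming_distance(temp_seq, temp_sub_seq)
--                 if hamming_d <= (lapping_num/2):  # judge hamming distance
--                     return 0
--         return 1
-- ===== SOURCE B (Python) =====
-- def overlapping_limit(seq, sub_seq, lapping_num):
--     L = lapping_num
--     n, m = len(seq), len(sub_seq)
--     if L < 0 or L > n or L > m:
--         return 1
--     thr = L // 2  # hamming <= L/2 iff hamming <= L//2 for integers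
--     # walk each diagonal d = k - i once, sliding a length-L mismatch window
--     for d in range(-(m - L), n - L + 1):
--         lo = d if d > 0 else 0
--         hi = n - L if n - L < m - L + d else m - L + d
--         cnt = sum(seq[lo + j] != sub_seq[lo + j - d] for j in range(L))
--         if cnt <= thr:
--             return 0
--         for k in range(lo + 1, hi + 1):
--             cnt += (seq[k + L - 1] != sub_seq[k + L - 1 - d]) - (seq[k - 1] != sub_seq[k - 1 - d])
--             if cnt <= thr:
--                 return 0
--     return 1
-- ===== Notes on version B (the rewrite author's own statement) =====
-- stated objective: faster
-- what changed: A rebuilds every length-L window of both strings character by character and compares all window pairs (O(n*m*L)); B walks each diagonal d = k - i once, maintaining a sliding length-L mismatch count updated in O(1) per window, and also returns early on the degenerate L < 0 / L > len cases instead of running empty loops.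
import Mathlib
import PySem

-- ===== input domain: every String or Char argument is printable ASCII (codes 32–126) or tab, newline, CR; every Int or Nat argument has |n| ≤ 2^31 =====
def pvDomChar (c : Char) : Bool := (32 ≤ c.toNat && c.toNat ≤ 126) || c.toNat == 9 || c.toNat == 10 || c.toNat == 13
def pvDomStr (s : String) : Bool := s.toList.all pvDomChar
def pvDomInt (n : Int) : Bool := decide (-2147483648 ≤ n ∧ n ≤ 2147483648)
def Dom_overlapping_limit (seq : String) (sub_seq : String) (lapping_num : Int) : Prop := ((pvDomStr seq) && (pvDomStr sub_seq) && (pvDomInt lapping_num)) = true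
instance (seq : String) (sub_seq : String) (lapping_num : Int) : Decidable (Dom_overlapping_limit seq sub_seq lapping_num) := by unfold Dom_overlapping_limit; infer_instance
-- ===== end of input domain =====

-- B replaces A's quadratic scan over all window pairs with rebuilt strings (O(n·m·L)) by one
-- sliding mismatch-count window per diagonal k - i (O(n·m)); same return value everywhere.

-- Python s[i]; every index at which either program evaluates this is in range, so the default is never used
def pvChar (s : List Char) (i : Int) : Char := PySem.List.pyGetD s i 'A'

-- ===== PORT A =====
-- hamming_distance: the unequal-length ValueError branch is never taken by overlapping_limit
-- (both window strings are built from exactly lapping_num characters); the zip mismatch sum is ported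
def hamming_distance (str1 str2 : List Char) : Int :=
  ((str1.zip str2).map (fun p => if p.1 ≠ p.2 then (1 : Int) else 0)).sum

-- `temp = ''` then `temp += s[start + j]` for j in range(0, L)
def pvWindowA (s : List Char) (start L : Int) : List Char :=
  (PySem.List.pyRange 0 L 1).foldl (fun acc j => acc ++ [pvChar s (start + j)]) []

-- inner `for k in range(0, len(seq) - lapping_num + 1)` with its early `return 0` (true = returned 0)
def pvLoopKA (cs tempSub : List Char) (L : Int) : List Int → Bool
  | [] => false
  | k :: rest =>
    let tempSeq := pvWindowA cs k L
    -- Python `hamming_d <= lapping_num/2` is float division; exact for these ints as 2*hamming_d ≤ L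
    if 2 * hamming_distance tempSeq tempSub ≤ L then true else pvLoopKA cs tempSub L rest

-- outer `for i in range(0, len(sub_seq) - lapping_num + 1)`
def pvLoopIA (cs ds : List Char) (L : Int) : List Int → Bool
  | [] => false
  | i :: rest =>
    let tempSub := pvWindowA ds i L
    if pvLoopKA cs tempSub L (PySem.List.pyRange 0 ((cs.length : Int) - L + 1) 1) then true
    else pvLoopIA cs ds L rest

def overlapping_limit (seq : String) (sub_seq : String) (lapping_num : Int) : Int :=
  let cs := seq.toList
  let ds := sub_seq.toList
  -- Python guard `lapping_num > len(seq) | lapping_num > len(sub_seq)` parses (| binds tighter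
  -- than >, comparisons chain) as L > (n | L) and (n | L) > m; ported literally. If it held,
  -- Python would raise ValueError; it never holds since L ≤ n | L for n ≥ 0 (pv_le_lor below),
  -- so the branch value is irrelevant.
  if lapping_num > Int.lor (cs.length : Int) lapping_num ∧
      Int.lor (cs.length : Int) lapping_num > (ds.length : Int) then 0  -- ValueError, unreachable
  else if pvLoopIA cs ds lapping_num
      (PySem.List.pyRange 0 ((ds.length : Int) - lapping_num + 1) 1) then 0
  else 1

-- ===== PORT B =====
-- mismatch indicator on diagonal d at absolute position t: seq[t] != sub_seq[t - d]
def pvMMB (cs ds : List Char) (d t : Int) : Int :=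
  if pvChar cs t ≠ pvChar ds (t - d) then 1 else 0

-- `lo = d if d > 0 else 0`
def pvLoB (d : Int) : Int := if d > 0 then d else 0
-- `hi = n - L if n - L < m - L + d else m - L + d`
def pvHiB (n m L d : Int) : Int := if n - L < m - L + d then n - L else m - L + d

-- `for k in range(lo + 1, hi + 1)` sliding the mismatch count, early `return 0` (true = returned 0)
def pvSlideB (cs ds : List Char) (L d thr cnt : Int) : List Int → Bool
  | [] => false
  | k :: rest =>
    let cnt' := cnt + pvMMB cs ds d (k + L - 1) - pvMMB cs ds d (k - 1)
    if cnt' ≤ thr then true else pvSlideB cs ds L d thr cnt' rest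

-- `for d in range(-(m - L), n - L + 1)`
def pvDiagB (cs ds : List Char) (L thr : Int) : List Int → Bool
  | [] => false
  | d :: rest =>
    let n : Int := cs.length
    let m : Int := ds.length
    let lo := pvLoB d
    let hi := pvHiB n m L d
    let cnt := ((PySem.List.pyRange 0 L 1).map (fun j => pvMMB cs ds d (lo + j))).sum
    if cnt ≤ thr then true
    else if pvSlideB cs ds L d thr cnt (PySem.List.pyRange (lo + 1) (hi + 1) 1) then true
    else pvDiagB cs ds L thr rest

def overlapping_limit_alt (seq : String) (sub_seq : String) (lapping_num : Int) : Int :=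
  let cs := seq.toList
  let ds := sub_seq.toList
  let n : Int := cs.length
  let m : Int := ds.length
  if lapping_num < 0 ∨ lapping_num > n ∨ lapping_num > m then 1
  else
    let thr := PySem.Int.floordiv lapping_num 2
    if pvDiagB cs ds lapping_num thr
        (PySem.List.pyRange (-(m - lapping_num)) (n - lapping_num + 1) 1) then 0
    else 1

-- ===== PRECONDITION & SPEC =====
def Spec_overlapping_limit (seq : String) (sub_seq : String) (lapping_num : Int) (out : Int) : Prop := out = overlapping_limit_alt seq sub_seq lapping_num
instance (seq : String) (sub_seq : String) (lapping_num : Int) (out : Int) : Decidable (Spec_overlapping_limit seq sub_seq lapping_num out) := by unfold Spec_overlapping_limit; infer_instance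

-- ===== CLAIM (what is proved, stated in full; the proofs are below) =====
def Claim_equal_overlapping_limit : Prop := ∀ (seq : String) (sub_seq : String) (lapping_num : Int), Dom_overlapping_limit seq sub_seq lapping_num → Spec_overlapping_limit seq sub_seq lapping_num (overlapping_limit seq sub_seq lapping_num)

-- ===== LEMMAS AND PROOFS =====

-- A's ValueError guard is unsatisfiable: the or-ed length is never below lapping_num
theorem pv_ldiff_le (b a : Nat) : Nat.ldiff b a ≤ b := by
  apply Nat.le_of_testBit
  intro i h
  rw [Nat.testBit_ldiff] at h
  exact (Bool.and_eq_true _ _ |>.mp h).1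

theorem pv_le_lor (n L : Int) (hn : 0 ≤ n) : L ≤ Int.lor n L := by
  cases n with
  | ofNat a => cases L with
    | ofNat b => simpa [Int.lor] using Int.ofNat_le.mpr Nat.right_le_or
    | negSucc b =>
      simp only [Int.lor]
      have := pv_ldiff_le b a
      omega
  | negSucc a => omega

-- the number of mismatches between window k of cs and window i of ds, both of length L
def pvCnt (cs ds : List Char) (i k L : Int) : Int :=
  ((PySem.List.pyRange 0 L 1).map
    (fun j => if pvChar cs (k + j) ≠ pvChar ds (i + j) then (1 : Int) else 0)).sum

theorem pvCnt_nonneg (cs ds : List Char) (i k L : Int) : 0 ≤ pvCnt cs ds i k L := by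
  apply List.sum_nonneg
  intro x hx
  simp only [List.mem_map] at hx
  obtain ⟨j, -, rfl⟩ := hx
  split <;> omega

theorem pvCnt_zero (cs ds : List Char) (i k : Int) : pvCnt cs ds i k 0 = 0 := by
  simp [pvCnt, PySem.List.pyRange_one_eq_nil (by omega : (0:Int) ≤ 0)]

theorem pvWindowA_eq (s : List Char) (start L : Int) :
    pvWindowA s start L = (PySem.List.pyRange 0 L 1).map (fun j => pvChar s (start + j)) := by
  unfold pvWindowA
  rw [PySem.List.foldl_append_singleton_eq_map]
  simp

theorem hamming_maps (l : List Int) (f g : Int → Char) :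
    hamming_distance (l.map f) (l.map g) =
      (l.map (fun j => if f j ≠ g j then (1 : Int) else 0)).sum := by
  unfold hamming_distance
  rw [List.zip_map']
  rw [List.map_map]
  rfl

theorem hamming_windows (cs ds : List Char) (i k L : Int) :
    hamming_distance (pvWindowA cs k L) (pvWindowA ds i L) = pvCnt cs ds i k L := by
  rw [pvWindowA_eq, pvWindowA_eq, hamming_maps]
  rfl

theorem pvLoopKA_iff (cs ds : List Char) (i L : Int) (ks : List Int) :
    pvLoopKA cs (pvWindowA ds i L) L ks = true ↔ ∃ k ∈ ks, 2 * pvCnt cs ds i k L ≤ L := by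
  induction ks with
  | nil => simp [pvLoopKA]
  | cons k rest ih =>
    simp only [pvLoopKA, hamming_windows, List.mem_cons]
    by_cases h : 2 * pvCnt cs ds i k L ≤ L
    · simp [h]
    · simp only [if_neg h, ih]
      constructor
      · rintro ⟨k', hk', hc⟩; exact ⟨k', Or.inr hk', hc⟩
      · rintro ⟨k', hk' | hk', hc⟩
        · exact absurd (hk' ▸ hc) h
        · exact ⟨k', hk', hc⟩

theorem pvLoopIA_iff (cs ds : List Char) (L : Int) (is_ : List Int) :
    pvLoopIA cs ds L is_ = true ↔
      ∃ i ∈ is_, ∃ k ∈ PySem.List.pyRange 0 ((cs.length : Int) - L + 1) 1,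
        2 * pvCnt cs ds i k L ≤ L := by
  induction is_ with
  | nil => simp [pvLoopIA]
  | cons i rest ih =>
    simp only [pvLoopIA, List.mem_cons]
    by_cases h : pvLoopKA cs (pvWindowA ds i L) L
        (PySem.List.pyRange 0 ((cs.length : Int) - L + 1) 1) = true
    · rw [if_pos h]
      rw [pvLoopKA_iff] at h
      obtain ⟨k, hk, hc⟩ := h
      exact iff_of_true rfl ⟨i, Or.inl rfl, k, hk, hc⟩
    · rw [if_neg h, ih]
      constructor
      · rintro ⟨i', hi', hrest⟩; exact ⟨i', Or.inr hi', hrest⟩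
      · rintro ⟨i', hi' | hi', k, hk, hc⟩
        · subst hi'
          exact absurd ((pvLoopKA_iff cs ds i' L _).mpr ⟨k, hk, hc⟩) h
        · exact ⟨i', hi', k, hk, hc⟩

-- telescoping shift of a length-L window sum
theorem sum_shift_nat (g : Nat → Int) (N : Nat) :
    ((List.range N).map (fun j => g (j + 1))).sum = ((List.range N).map g).sum + g N - g 0 := by
  induction N with
  | zero => simp
  | succ N ih => simp [List.range_succ, ih]; ring

theorem pvCntB_eq (cs ds : List Char) (d t L : Int) :
    ((PySem.List.pyRange 0 L 1).map (fun j => pvMMB cs ds d (t + j))).sum =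
      pvCnt cs ds (t - d) t L := by
  unfold pvCnt pvMMB
  congr 1
  apply List.map_congr_left
  intro j _
  have : t + j - d = t - d + j := by ring
  rw [this]

theorem sum_shift_int (f : Int → Int) (t L : Int) (h0 : 0 ≤ L) :
    ((PySem.List.pyRange 0 L 1).map (fun j => f (t + 1 + j))).sum
      = ((PySem.List.pyRange 0 L 1).map (fun j => f (t + j))).sum + f (t + L) - f t := by
  rw [PySem.List.pyRange_one, List.map_map, List.map_map]
  have h1 : ((List.range (L - 0).toNat).map ((fun j => f (t + 1 + j)) ∘ fun k : Nat => (0 : Int) + k)).sum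
      = ((List.range (L - 0).toNat).map (fun k : Nat => (fun k2 : Nat => f (t + k2)) (k + 1))).sum := by
    apply congrArg
    apply List.map_congr_left
    intro k _
    simp only [Function.comp]
    congr 1
    push_cast
    ring
  rw [h1, sum_shift_nat (fun k : Nat => f (t + k)) (L - 0).toNat]
  have h2 : ((List.range (L - 0).toNat).map ((fun j => f (t + j)) ∘ fun k : Nat => (0 : Int) + k)).sum
      = ((List.range (L - 0).toNat).map (fun k : Nat => f (t + k))).sum := by
    apply congrArg
    apply List.map_congr_left
    intro k _
    simp
  rw [h2]
  have h3 : (((L : Int) - 0).toNat : Int) = L := by omega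
  rw [h3]
  simp

theorem pvCnt_shift (cs ds : List Char) (d t L : Int) (hL : 0 ≤ L) :
    pvCnt cs ds (t + 1 - d) (t + 1) L =
      pvCnt cs ds (t - d) t L + pvMMB cs ds d (t + L) - pvMMB cs ds d t := by
  rw [← pvCntB_eq cs ds d (t + 1) L, ← pvCntB_eq cs ds d t L]
  exact sum_shift_int (fun u => pvMMB cs ds d u) t L hL


theorem pvSlideB_iff (cs ds : List Char) (L d thr : Int) (hL : 1 ≤ L) :
    ∀ (N : Nat) (a b cnt : Int), (b - a).toNat = N →
      cnt = pvCnt cs ds (a - 1 - d) (a - 1) L →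
      (pvSlideB cs ds L d thr cnt (PySem.List.pyRange a b 1) = true ↔
        ∃ k, a ≤ k ∧ k < b ∧ pvCnt cs ds (k - d) k L ≤ thr) := by
  intro N
  induction N with
  | zero =>
    intro a b cnt hN hc
    rw [PySem.List.pyRange_one_eq_nil (by omega)]
    simp only [pvSlideB]
    constructor
    · intro h; cases h
    · rintro ⟨k, h1, h2, -⟩; omega
  | succ N ih =>
    intro a b cnt hN hc
    have hab : a < b := by omega
    rw [PySem.List.pyRange_one_cons hab]
    simp only [pvSlideB]
    have hcnt' : cnt + pvMMB cs ds d (a + L - 1) - pvMMB cs ds d (a - 1)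
        = pvCnt cs ds (a - d) a L := by
      have hs := pvCnt_shift cs ds d (a - 1) L (by omega)
      have e1 : a - 1 + 1 - d = a - d := by ring
      have e2 : a - 1 + 1 = a := by ring
      have e3 : a - 1 + L = a + L - 1 := by ring
      rw [e1, e2, e3] at hs
      rw [hc]
      omega
    rw [hcnt']
    by_cases hle : pvCnt cs ds (a - d) a L ≤ thr
    · rw [if_pos hle]
      exact iff_of_true rfl ⟨a, le_refl a, hab, hle⟩
    · rw [if_neg hle]
      rw [ih (a + 1) b (pvCnt cs ds (a - d) a L) (by omega) (by norm_num)]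
      constructor
      · rintro ⟨k, h1, h2, h3⟩; exact ⟨k, by omega, h2, h3⟩
      · rintro ⟨k, h1, h2, h3⟩
        rcases eq_or_lt_of_le h1 with h | h
        · exact absurd (h ▸ h3) hle
        · exact ⟨k, by omega, h2, h3⟩

theorem pvDiagB_iff (cs ds : List Char) (L thr : Int)
    (_h0 : 0 ≤ L) (hn : L ≤ (cs.length : Int)) (hm : L ≤ (ds.length : Int))
    (hthr : thr = PySem.Int.floordiv L 2) :
    ∀ (dl : List Int),
      (∀ d ∈ dl, -((ds.length : Int) - L) ≤ d ∧ d ≤ (cs.length : Int) - L) →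
      (pvDiagB cs ds L thr dl = true ↔
        ∃ d ∈ dl, ∃ k, pvLoB d ≤ k ∧ k ≤ pvHiB (cs.length : Int) (ds.length : Int) L d ∧
          pvCnt cs ds (k - d) k L ≤ thr) := by
  intro dl
  induction dl with
  | nil => intro _; simp [pvDiagB]
  | cons d rest ih =>
    intro hbd
    obtain ⟨hd1, hd2⟩ := hbd d (List.mem_cons_self ..)
    have hlohi : pvLoB d ≤ pvHiB (cs.length : Int) (ds.length : Int) L d := by
      simp only [pvLoB, pvHiB]
      split <;> split <;> omega
    simp only [pvDiagB]
    rw [pvCntB_eq]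
    by_cases h1 : pvCnt cs ds (pvLoB d - d) (pvLoB d) L ≤ thr
    · rw [if_pos h1]
      exact iff_of_true rfl ⟨d, List.mem_cons_self .., pvLoB d, le_refl _, hlohi, h1⟩
    · rw [if_neg h1]
      have hthr0 : 0 ≤ thr := by
        rw [hthr, PySem.Int.floordiv_eq_ediv_of_pos (by omega : (0:Int) < 2)]
        omega
      have hL1 : 1 ≤ L := by
        by_contra hcon
        have hL0 : L = 0 := by omega
        subst hL0
        rw [pvCnt_zero] at h1
        omega
      have S := pvSlideB_iff cs ds L d thr hL1
        ((pvHiB (cs.length : Int) (ds.length : Int) L d + 1) - (pvLoB d + 1)).toNat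
        (pvLoB d + 1) (pvHiB (cs.length : Int) (ds.length : Int) L d + 1)
        (pvCnt cs ds (pvLoB d - d) (pvLoB d) L) rfl (by norm_num)
      by_cases h2 : pvSlideB cs ds L d thr (pvCnt cs ds (pvLoB d - d) (pvLoB d) L)
          (PySem.List.pyRange (pvLoB d + 1)
            (pvHiB (cs.length : Int) (ds.length : Int) L d + 1) 1) = true
      · rw [if_pos h2]
        obtain ⟨k, hk1, hk2, hk3⟩ := S.mp h2
        exact iff_of_true rfl ⟨d, List.mem_cons_self .., k, by omega, by omega, hk3⟩
      · rw [if_neg h2]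
        rw [ih (fun d' hd' => hbd d' (List.mem_cons_of_mem _ hd'))]
        constructor
        · rintro ⟨d', hd', rest'⟩
          exact ⟨d', List.mem_cons_of_mem _ hd', rest'⟩
        · rintro ⟨d', hd', k, hk1, hk2, hk3⟩
          rcases List.mem_cons.mp hd' with rfl | hd''
          · rcases eq_or_lt_of_le hk1 with h | h
            · exact absurd (h ▸ hk3) h1
            · exact absurd (S.mpr ⟨k, by omega, by omega, hk3⟩) h2
          · exact ⟨d', hd'', k, hk1, hk2, hk3⟩

theorem pv_thr_iff (c L : Int) (_h0 : 0 ≤ L) :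
    c ≤ PySem.Int.floordiv L 2 ↔ 2 * c ≤ L := by
  rw [PySem.Int.floordiv_eq_ediv_of_pos (by omega)]
  omega

-- ===== VERDICT (by name: the statement is the Claim_ definition above) =====
theorem overlapping_limit_spec : Claim_equal_overlapping_limit := by
  intro seq sub_seq L _
  show overlapping_limit seq sub_seq L = overlapping_limit_alt seq sub_seq L
  simp only [overlapping_limit, overlapping_limit_alt]
  have hguard : ¬ (L > Int.lor ((seq.toList.length : Nat) : Int) L ∧
      Int.lor ((seq.toList.length : Nat) : Int) L > ((sub_seq.toList.length : Nat) : Int)) := by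
    rintro ⟨h1, -⟩
    exact absurd (pv_le_lor (seq.toList.length : Int) L (by positivity)) (not_le.mpr h1)
  rw [if_neg hguard]
  by_cases hbad : L < 0 ∨ L > ((seq.toList.length : Nat) : Int) ∨
      L > ((sub_seq.toList.length : Nat) : Int)
  · rw [if_pos hbad]
    have hA : ¬ pvLoopIA seq.toList sub_seq.toList L
        (PySem.List.pyRange 0 ((sub_seq.toList.length : Int) - L + 1) 1) = true := by
      rw [pvLoopIA_iff]
      rintro ⟨i, hi, k, hk, hc⟩
      rw [PySem.List.mem_pyRange_one] at hi hk
      have hnn := pvCnt_nonneg seq.toList sub_seq.toList i k L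
      omega
    rw [if_neg hA]
  · rw [if_neg hbad]
    rw [not_or, not_or] at hbad
    obtain ⟨h0', hLn, hLm⟩ := hbad
    rw [not_lt] at h0' hLn hLm
    have h0 : 0 ≤ L := h0'
    have hLn : L ≤ ((seq.toList.length : Nat) : Int) := hLn
    have hLm : L ≤ ((sub_seq.toList.length : Nat) : Int) := hLm
    have hiff : pvLoopIA seq.toList sub_seq.toList L
        (PySem.List.pyRange 0 ((sub_seq.toList.length : Int) - L + 1) 1) = true ↔
        pvDiagB seq.toList sub_seq.toList L (PySem.Int.floordiv L 2)
          (PySem.List.pyRange (-((sub_seq.toList.length : Int) - L))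
            ((seq.toList.length : Int) - L + 1) 1) = true := by
      rw [pvLoopIA_iff,
        pvDiagB_iff seq.toList sub_seq.toList L (PySem.Int.floordiv L 2) h0 hLn hLm rfl _
          (fun d hd => by rw [PySem.List.mem_pyRange_one] at hd; omega)]
      constructor
      · rintro ⟨i, hi, k, hk, hc⟩
        rw [PySem.List.mem_pyRange_one] at hi hk
        refine ⟨k - i, ?_, k, ?_, ?_, ?_⟩
        · rw [PySem.List.mem_pyRange_one]; omega
        · simp only [pvLoB]; split <;> omega
        · simp only [pvHiB]; split <;> omega
        · have e : k - (k - i) = i := by ring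
          rw [e, pv_thr_iff _ _ h0]
          exact hc
      · rintro ⟨d, hd, k, hk1, hk2, hc⟩
        rw [PySem.List.mem_pyRange_one] at hd
        have hk1' : 0 ≤ k ∧ d ≤ k := by
          simp only [pvLoB] at hk1; split at hk1 <;> omega
        have hk2' : k ≤ (seq.toList.length : Int) - L ∧
            k ≤ (sub_seq.toList.length : Int) - L + d := by
          simp only [pvHiB] at hk2; split at hk2 <;> omega
        rw [pv_thr_iff _ _ h0] at hc
        refine ⟨k - d, ?_, k, ?_, ?_⟩
        · rw [PySem.List.mem_pyRange_one]; omega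
        · rw [PySem.List.mem_pyRange_one]; omega
        · exact hc
    by_cases hA : pvLoopIA seq.toList sub_seq.toList L
        (PySem.List.pyRange 0 ((sub_seq.toList.length : Int) - L + 1) 1) = true
    · rw [if_pos hA, if_pos (hiff.mp hA)]
    · rw [if_neg hA, if_neg (fun h => hA (hiff.mpr h))]
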